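-- pv_equiv track=rewrite | github.com/offbynull/offbynull.github.io | docs/data/learn/Bioinformatics/input/ch9_code/src/Stepik.9.11.CodeChallenge.BurrowsWheelerMatching_FirstOccurrence.py | create_first_occurrence
-- ===== SOURCE A (Python) =====
-- import functools
-- from collections import Counter
--
-- def cmp(a: tuple[str, int], b: tuple[str, int]):
--     assert len(a[0]) == 1
--     assert len(b[0]) == 1
--     (a_ch, a_idx), (b_ch, b_idx) = a, b
--     # compare against term symbol
--     if a_ch == '$' and b_ch == '$':
--         return 0
--     if a_ch == '$':
--         return -1
--     if b_ch == '$':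
--         return 1
--     # compare against each other
--     if a_ch < b_ch:
--         return -1
--     if a_ch > b_ch:
--         return 1
--     # at this point, chars are equal, check idxes
--     if a_idx < b_idx:
--         return -1
--     if a_idx > b_idx:
--         return 1
--     # at this point, chars and idxes are equal
--     return 0
--
-- def create_first_occurrence(last_col: str):
--     c = Counter()
--     last_col_indexed = []
--     for ch in last_col:
--         last_col_indexed.append((ch, c[ch]))
--         c[ch] += 1
--     first_col_indexed = sorted(last_col_indexed, key=functools.cmp_to_key(cmp))
--     first_occurrence = {}
--     for i, (ch, cnt) in enumerate(first_col_indexed):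
--         if cnt == 0:
--             first_occurrence[ch] = i
--     return first_occurrence
-- ===== SOURCE B (Python) =====
-- from collections import Counter
--
--
-- def create_first_occurrence(last_col: str):
--     c = Counter(last_col)
--     order = (['$'] if '$' in c else []) + sorted(k for k in c if k != '$')
--     first_occurrence = {}
--     i = 0
--     for ch in order:
--         first_occurrence[ch] = i
--         i += c[ch]
--     return first_occurrence
-- ===== Notes on version B (the rewrite author's own statement) =====
-- stated objective: faster
-- what changed: Instead of building an occurrence-indexed copy of the column, comparator-sorting it and scanning the sorted list, B counts the characters once and emits prefix sums over the sorted alphabet with '$' first.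
import Mathlib
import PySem

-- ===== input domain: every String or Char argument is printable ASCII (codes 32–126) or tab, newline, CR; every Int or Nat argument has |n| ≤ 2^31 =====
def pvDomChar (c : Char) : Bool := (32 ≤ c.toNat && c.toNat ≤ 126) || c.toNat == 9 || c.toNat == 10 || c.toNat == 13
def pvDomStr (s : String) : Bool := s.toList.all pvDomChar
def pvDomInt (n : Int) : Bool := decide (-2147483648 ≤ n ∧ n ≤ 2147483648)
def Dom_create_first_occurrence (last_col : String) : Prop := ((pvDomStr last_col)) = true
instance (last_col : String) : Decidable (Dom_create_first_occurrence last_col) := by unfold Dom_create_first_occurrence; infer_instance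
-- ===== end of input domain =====

-- B replaces A's index-annotate / comparator-sort / scan pipeline by counting characters once and
-- emitting prefix sums over the sorted alphabet with '$' first (objective: faster, measured).

-- ===== PORT A =====
-- Python's 1-character strings iterated from `last_col` are modelled as Char; the returned dict's
-- 1-character string keys are rebuilt with String.ofList at the end (exact on the ASCII domain).
def cfoCmp (a b : Char × Int) : Int :=
  if a.1 = '$' ∧ b.1 = '$' then 0
  else if a.1 = '$' then -1
  else if b.1 = '$' then 1
  else if a.1 < b.1 then -1
  else if b.1 < a.1 then 1
  else if a.2 < b.2 then -1
  else if b.2 < a.2 then 1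
  else 0

-- `sorted(..., key=functools.cmp_to_key(cmp))` is Python's stable sort under the comparator `cmp`;
-- it is ported as PySem's stable insertion sort (the shape of PySem.List.sorted_eq_foldl_insertBy)
-- driven by the transliterated comparator `cfoCmp`.
def cfoIndexed (s : List Char) : PySem.Dict Char Int × List (Char × Int) :=
  s.foldl
    (fun (st : PySem.Dict Char Int × List (Char × Int)) ch =>
      (st.1.modify ch 0 (· + 1), st.2 ++ [(ch, st.1.getD ch 0)]))
    (PySem.Dict.empty, [])

def cfoSort (l : List (Char × Int)) : List (Char × Int) :=
  l.foldl (fun acc x => PySem.List.insertBy (fun a b => decide (cfoCmp a b < 0)) x acc) []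

def cfoDict (fci : List (Char × Int)) : PySem.Dict Char Int :=
  (PySem.List.enumerate fci).foldl
    (fun (d : PySem.Dict Char Int) q => if q.2.2 = 0 then d.insert q.2.1 q.1 else d)
    PySem.Dict.empty

def create_first_occurrence (last_col : String) : List (String × Int) :=
  (cfoDict (cfoSort (cfoIndexed last_col.toList).2)).items.map (fun q => (String.ofList [q.1], q.2))

-- ===== PORT B =====
def cfoOrder (c : PySem.Dict Char Int) : List Char :=
  (if c.contains '$' then ['$'] else []) ++
    PySem.List.sorted (c.keys.filter (fun k => k != '$')) (fun x => x) false

def cfoAccum (c : PySem.Dict Char Int) (order : List Char) : PySem.Dict Char Int × Int :=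
  order.foldl
    (fun (st : PySem.Dict Char Int × Int) ch => (st.1.insert ch st.2, st.2 + c.getD ch 0))
    (PySem.Dict.empty, 0)

def create_first_occurrence_alt (last_col : String) : List (String × Int) :=
  let c := PySem.Dict.counter last_col.toList
  ((cfoAccum c (cfoOrder c)).1).items.map (fun q => (String.ofList [q.1], q.2))

-- ===== PRECONDITION & SPEC =====
def Spec_create_first_occurrence (last_col : String) (out : List (String × Int)) : Prop := out = create_first_occurrence_alt last_col
instance (last_col : String) (out : List (String × Int)) : Decidable (Spec_create_first_occurrence last_col out) := by unfold Spec_create_first_occurrence; infer_instance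

-- ===== CLAIM (what is proved, stated in full; the proofs are below) =====
def Claim_equal_create_first_occurrence : Prop := ∀ (last_col : String), Dom_create_first_occurrence last_col → Spec_create_first_occurrence last_col (create_first_occurrence last_col)

-- ===== LEMMAS AND PROOFS =====

-- the '$'-first strict order on characters that cfoCmp induces on first components
def cLT (c d : Char) : Prop := (c = '$' ∧ d ≠ '$') ∨ (c ≠ '$' ∧ d ≠ '$' ∧ c < d)

def keyOrder (s : List Char) : List Char :=
  (if s.contains '$' then ['$'] else []) ++
    PySem.List.sorted ((PySem.Set.ofList s).filter (fun k => k != '$')) (fun x => x) false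

def blk (c : Char) (n : Nat) : List (Char × Int) := (List.range n).map (fun (i : Nat) => (c, (i : Int)))

def canon (s : List Char) : List (Char × Int) := (keyOrder s).flatMap (fun c => blk c (s.count c))

def scanL (f : Char → Int) : List Char → Int → List (Char × Int)
  | [], _ => []
  | c :: t, i => (c, i) :: scanL f t (i + f c)

theorem pairwise_lt_of_le_nodup (l : List Char) (h1 : l.Pairwise (·≤·)) (h2 : l.Nodup) :
    l.Pairwise (·<·) := (h1.and h2).imp (fun h => lt_of_le_of_ne h.1 h.2)

theorem mem_sortedF (s : List Char) (d : Char) :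
    d ∈ PySem.List.sorted ((PySem.Set.ofList s).filter (fun k => k != '$')) (fun x => x) false
      ↔ d ∈ s ∧ d ≠ '$' := by
  rw [PySem.List.mem_sorted, List.mem_filter, PySem.Set.mem_ofList]
  simp

theorem nodup_sortedF (s : List Char) :
    (PySem.List.sorted ((PySem.Set.ofList s).filter (fun k => k != '$')) (fun x => x) false).Nodup :=
  (PySem.List.sorted_perm _ _ _).symm.nodup ((PySem.Set.nodup_ofList s).filter _)

theorem pairwise_sortedF (s : List Char) :
    (PySem.List.sorted ((PySem.Set.ofList s).filter (fun k => k != '$')) (fun x => x) false).Pairwise (·<·) :=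
  pairwise_lt_of_le_nodup _ (PySem.List.sorted_pairwise _ _) (nodup_sortedF s)

theorem keyOrder_subset (s : List Char) : ∀ c ∈ keyOrder s, c ∈ s := by
  intro c hc
  unfold keyOrder at hc
  rcases List.mem_append.1 hc with h | h
  · split at h
    · rename_i hh; simp at h; subst h; simpa using hh
    · simp at h
  · exact ((mem_sortedF s c).1 h).1

theorem keyOrder_pairwise (s : List Char) : (keyOrder s).Pairwise cLT := by
  unfold keyOrder
  apply List.pairwise_append.2
  refine ⟨?_, ?_, ?_⟩
  · split <;> simp
  · refine List.Pairwise.imp_of_mem ?_ (pairwise_sortedF s)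
    intro a b ha hb h
    exact Or.inr ⟨((mem_sortedF s a).1 ha).2, ((mem_sortedF s b).1 hb).2, h⟩
  · intro x hx y hy
    split at hx
    · simp at hx; subst hx
      exact Or.inl ⟨rfl, ((mem_sortedF s y).1 hy).2⟩
    · simp at hx


theorem keyOrder_nodup (s : List Char) : (keyOrder s).Nodup :=
  (keyOrder_pairwise s).imp (fun h => by
    rcases h with ⟨h1, h2⟩ | ⟨_, _, h⟩
    · exact fun e => h2 (e ▸ h1)
    · exact ne_of_lt h)

theorem keyOrder_append_mem {s : List Char} {c : Char} (h : c ∈ s) :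
    keyOrder (s ++ [c]) = keyOrder s := by
  have hset : PySem.Set.ofList (s ++ [c]) = PySem.Set.ofList s := by
    rw [PySem.Set.ofList_eq_foldl, List.foldl_append]
    rw [← PySem.Set.ofList_eq_foldl]
    show PySem.Set.add _ c = _
    unfold PySem.Set.add
    rw [if_pos]
    simp [PySem.Set.contains, h]
  unfold keyOrder
  rw [hset]
  congr 1
  by_cases hc : c = '$'
  · subst hc; simp [h]
  · simp [show ¬('$' = c) from fun e => hc e.symm]

theorem pairwise_dropWhile_gt (c : Char) :
    ∀ (S : List Char), S.Pairwise (·<·) → (∀ x ∈ S, x ≠ c) →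
      ∀ d ∈ S.dropWhile (fun x => decide (x < c)), c < d := by
  intro S
  induction S with
  | nil => intro _ _ d hd; simp [List.dropWhile] at hd
  | cons y t ih =>
    intro hp hne d hd
    rw [List.dropWhile_cons] at hd
    by_cases hy : y < c
    · rw [if_pos (by simpa using hy)] at hd
      exact ih hp.tail (fun x hx => hne x (by simp [hx])) d hd
    · rw [if_neg (by simpa using hy)] at hd
      have hcy : c < y := lt_of_le_of_ne (le_of_not_gt hy) (fun e => hne y (by simp) e.symm)
      rcases List.mem_cons.1 hd with rfl | hd
      · exact hcy
      · exact lt_trans hcy (List.rel_of_pairwise_cons hp hd)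

theorem keyOrder_append_not_mem {s : List Char} {c : Char} (h : c ∉ s) :
    ∃ os1 os2, keyOrder s = os1 ++ os2 ∧ keyOrder (s ++ [c]) = os1 ++ c :: os2 := by
  have hset : PySem.Set.ofList (s ++ [c]) = PySem.Set.ofList s ++ [c] := by
    rw [PySem.Set.ofList_eq_foldl, List.foldl_append, ← PySem.Set.ofList_eq_foldl]
    show PySem.Set.add _ c = _
    unfold PySem.Set.add
    rw [if_neg]
    simp [PySem.Set.contains, h]
  by_cases hc : c = '$'
  · subst hc
    refine ⟨[], keyOrder s, by simp, ?_⟩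
    unfold keyOrder
    rw [hset, List.filter_append]
    have h1 : ¬ s.contains '$' := by simpa using h
    simp only [h1]
    simp
  · -- c ≠ '$': '$'-membership unchanged, sorted part gains c at its place
    set F := (PySem.Set.ofList s).filter (fun k => k != '$') with hF
    set S := PySem.List.sorted F (fun x => x) false with hS
    have hcF : c ∉ F := fun hm => h (by simpa using (List.mem_filter.1 hm).1)
    have hcS : ∀ x ∈ S, x ≠ c := fun x hx e =>
      hcF (by rw [← e]; exact (PySem.List.mem_sorted _ _ _ _).1 hx)
    have hpair : S.Pairwise (·<·) := pairwise_sortedF s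
    set tw := S.takeWhile (fun x => decide (x < c)) with htw
    set dw := S.dropWhile (fun x => decide (x < c)) with hdw
    have hsplit : S = tw ++ dw := (List.takeWhile_append_dropWhile).symm
    have htwlt : ∀ d ∈ tw, d < c := fun d hd => by
      simpa using List.mem_takeWhile_imp hd
    have hdwgt : ∀ d ∈ dw, c < d := pairwise_dropWhile_gt c S hpair hcS
    have hnew : PySem.List.sorted (F ++ [c]) (fun x => x) false = tw ++ c :: dw := by
      apply PySem.List.sorted_id_eq_of_perm_of_pairwise
      · have h1 : (tw ++ c :: dw).Perm (c :: (tw ++ dw)) := List.perm_middle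
        have h2 : (tw ++ dw).Perm F := hsplit ▸ PySem.List.sorted_perm F (fun x => x) false
        exact h1.trans ((h2.cons c).trans (List.perm_append_singleton c F).symm)
      · apply List.pairwise_append.2
        refine ⟨(List.pairwise_append.1 (hsplit ▸ hpair)).1.imp le_of_lt, ?_, ?_⟩
        · apply List.pairwise_cons.2
          refine ⟨fun d hd => le_of_lt (hdwgt d hd), (List.pairwise_append.1 (hsplit ▸ hpair)).2.1.imp le_of_lt⟩
        · intro x hx y hy
          rcases List.mem_cons.1 hy with rfl | hy
          · exact le_of_lt (htwlt x hx)
          · exact le_of_lt (lt_trans (htwlt x hx) (hdwgt y hy))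
    refine ⟨(if s.contains '$' then ['$'] else []) ++ tw, dw, ?_, ?_⟩
    · unfold keyOrder; rw [← hF, ← hS, hsplit]; simp
    · unfold keyOrder
      rw [hset, List.filter_append]
      have hfc : List.filter (fun k => k != '$') [c] = [c] := by simp [hc]
      rw [hfc, ← hF, hnew]
      have hcont : (s ++ [c]).contains '$' = s.contains '$' := by
        simp [List.contains_eq_mem, show ¬('$' = c) from fun e => hc e.symm]
      rw [hcont]
      simp

theorem mem_keyOrder (s : List Char) (c : Char) : c ∈ keyOrder s ↔ c ∈ s := by
  constructor
  · exact keyOrder_subset s c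
  · intro h
    unfold keyOrder
    by_cases hc : c = '$'
    · subst hc; simp [h]
    · exact List.mem_append_right _ ((mem_sortedF s c).2 ⟨h, hc⟩)

theorem mem_blk {y : Char × Int} {c : Char} {n : Nat} (h : y ∈ blk c n) :
    ∃ i : Nat, i < n ∧ y = (c, (i : Int)) := by
  simp only [blk, List.mem_map, List.mem_range] at h
  obtain ⟨i, hi, hy⟩ := h
  exact ⟨i, hi, hy.symm⟩

theorem blk_succ (c : Char) (n : Nat) : blk c (n + 1) = blk c n ++ [(c, (n : Int))] := by
  unfold blk; rw [List.range_succ]; simp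

theorem blk_cons {c : Char} {n : Nat} (h : 0 < n) :
    ∃ t, blk c n = (c, (0 : Int)) :: t := by
  obtain ⟨m, rfl⟩ := Nat.exists_eq_add_of_lt h
  refine ⟨(List.range m).map (fun i => (c, ((i + 1 : Nat) : Int))), ?_⟩
  unfold blk
  rw [show 0 + m + 1 = m + 1 by omega, List.range_succ_eq_map, List.map_cons, List.map_map]
  refine congrArg₂ _ rfl (List.map_congr_left ?_)
  intro i _
  simp [Nat.succ_eq_add_one]

theorem bf_false_of_cLT_rev {c d : Char} (h : cLT d c) (n j : Int) :
    (decide (cfoCmp (c, n) (d, j) < 0)) = false := by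
  rcases h with ⟨h1, h2⟩ | ⟨h1, h2, h3⟩
  · simp [cfoCmp, h1, h2]
  · simp [cfoCmp, h1, h2, h3, lt_asymm h3]

theorem bf_false_self {c : Char} {n j : Int} (h : j < n) :
    (decide (cfoCmp (c, n) (c, j) < 0)) = false := by
  by_cases hc : c = '$'
  · simp [cfoCmp, hc]
  · simp [cfoCmp, hc, h, lt_asymm h]

theorem bf_true_of_cLT {c d : Char} (h : cLT c d) (n j : Int) :
    (decide (cfoCmp (c, n) (d, j) < 0)) = true := by
  rcases h with ⟨h1, h2⟩ | ⟨h1, h2, h3⟩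
  · simp [cfoCmp, h1, h2]
  · simp [cfoCmp, h1, h2, h3]

theorem insertBy_cons_true {α : Type} (bf : α → α → Bool) (x y : α) (ys : List α)
    (h : bf x y = true) : PySem.List.insertBy bf x (y :: ys) = x :: y :: ys := by
  simp [PySem.List.insertBy, h]

theorem cLT_ne {a b : Char} (h : cLT a b) : a ≠ b := by
  rcases h with ⟨h1, h2⟩ | ⟨_, _, h⟩
  · exact fun e => h2 (e ▸ h1)
  · exact ne_of_lt h

theorem insertBy_append {α : Type} (bf : α → α → Bool) (x : α) (L1 L2 : List α)
    (h : ∀ y ∈ L1, bf x y = false) :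
    PySem.List.insertBy bf x (L1 ++ L2) = L1 ++ PySem.List.insertBy bf x L2 := by
  induction L1 with
  | nil => rfl
  | cons y t ih =>
    simp only [List.cons_append, PySem.List.insertBy, h y (by simp)]
    simp only [Bool.false_eq_true, if_false, List.cons_inj_right]
    exact ih (fun z hz => h z (by simp [hz]))

theorem flat_congr (os : List Char) (m m' : Char → Nat) (h : ∀ d ∈ os, m d = m' d) :
    os.flatMap (fun d => blk d (m d)) = os.flatMap (fun d => blk d (m' d)) := by
  induction os with
  | nil => rfl
  | cons a t ih =>
    rw [List.flatMap_cons, List.flatMap_cons, h a (by simp), ih (fun d hd => h d (by simp [hd]))]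

theorem bf_false_flat {c : Char} {n : Int} (os : List Char) (m : Char → Nat)
    (h : ∀ d ∈ os, cLT d c) :
    ∀ y ∈ os.flatMap (fun d => blk d (m d)), (decide (cfoCmp (c, n) y < 0)) = false := by
  intro y hy
  rcases List.mem_flatMap.1 hy with ⟨d, hd, hyd⟩
  rcases mem_blk hyd with ⟨i, _, rfl⟩
  exact bf_false_of_cLT_rev (h d hd) n i

theorem insertBy_flat_front {c : Char} {n : Int} (os : List Char) (m : Char → Nat)
    (h : ∀ d ∈ os, cLT c d) (hm : ∀ d ∈ os, 0 < m d) :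
    PySem.List.insertBy (fun a b => decide (cfoCmp a b < 0)) (c, n)
        (os.flatMap (fun d => blk d (m d)))
      = (c, n) :: os.flatMap (fun d => blk d (m d)) := by
  cases os with
  | nil => rfl
  | cons d t =>
    rw [List.flatMap_cons]
    obtain ⟨tl, htl⟩ := blk_cons (hm d (by simp))
    rw [htl, List.cons_append]
    exact insertBy_cons_true _ _ _ _ (bf_true_of_cLT (h d (by simp)) n 0)

theorem insert_canon (s : List Char) (c : Char) :
    PySem.List.insertBy (fun a b => decide (cfoCmp a b < 0)) (c, (s.count c : Int)) (canon s)
      = canon (s ++ [c]) := by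
  by_cases hmem : c ∈ s
  · obtain ⟨os1, os2, heq⟩ := List.append_of_mem ((mem_keyOrder s c).2 hmem)
    have hp := keyOrder_pairwise s
    rw [heq] at hp
    have hp1 := List.pairwise_append.1 hp
    have hos1c : ∀ d ∈ os1, cLT d c := fun d hd => hp1.2.2 d hd c (by simp)
    have hcos2 : ∀ d ∈ os2, cLT c d := fun d hd => List.rel_of_pairwise_cons hp1.2.1 hd
    have hsub2 : ∀ d ∈ os2, d ∈ s := fun d hd =>
      keyOrder_subset s d (by rw [heq]; exact List.mem_append_right _ (List.mem_cons_of_mem _ hd))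
    unfold canon
    rw [keyOrder_append_mem hmem, heq, List.flatMap_append, List.flatMap_cons,
        List.flatMap_append, List.flatMap_cons]
    rw [insertBy_append _ _ _ _ (bf_false_flat os1 _ hos1c)]
    rw [insertBy_append _ _ _ _ (fun y hy => by
      rcases mem_blk hy with ⟨i, hi, rfl⟩
      exact bf_false_self (by exact_mod_cast hi))]
    rw [insertBy_flat_front os2 _ hcos2 (fun d hd => List.count_pos_iff.2 (hsub2 d hd))]
    have hc1 : (s ++ [c]).count c = s.count c + 1 := by simp
    rw [hc1, blk_succ]
    have hflat1 : os1.flatMap (fun d => blk d ((s ++ [c]).count d))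
        = os1.flatMap (fun d => blk d (s.count d)) := by
      apply flat_congr
      intro d hd
      have : d ≠ c := cLT_ne (hos1c d hd)
      simp [List.count_eq_zero, this]
    have hflat2 : os2.flatMap (fun d => blk d ((s ++ [c]).count d))
        = os2.flatMap (fun d => blk d (s.count d)) := by
      apply flat_congr
      intro d hd
      have : d ≠ c := fun e => cLT_ne (hcos2 d hd) e.symm
      simp [List.count_eq_zero, this]
    rw [hflat1, hflat2]
    simp
  · have hn : s.count c = 0 := List.count_eq_zero.2 hmem
    obtain ⟨os1, os2, h1, h2⟩ := keyOrder_append_not_mem hmem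
    have hp := keyOrder_pairwise (s ++ [c])
    rw [h2] at hp
    have hp1 := List.pairwise_append.1 hp
    have hos1c : ∀ d ∈ os1, cLT d c := fun d hd => hp1.2.2 d hd c (by simp)
    have hcos2 : ∀ d ∈ os2, cLT c d := fun d hd => List.rel_of_pairwise_cons hp1.2.1 hd
    have hsub2 : ∀ d ∈ os2, d ∈ s := fun d hd =>
      keyOrder_subset s d (by rw [h1]; exact List.mem_append_right _ hd)
    unfold canon
    rw [h1, h2, List.flatMap_append, List.flatMap_append, List.flatMap_cons]
    rw [insertBy_append _ _ _ _ (bf_false_flat os1 _ hos1c)]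
    rw [insertBy_flat_front os2 _ hcos2 (fun d hd => List.count_pos_iff.2 (hsub2 d hd))]
    have hc1 : (s ++ [c]).count c = 1 := by simp [hn]
    rw [hc1]
    have hflat1 : os1.flatMap (fun d => blk d ((s ++ [c]).count d))
        = os1.flatMap (fun d => blk d (s.count d)) := by
      apply flat_congr
      intro d hd
      have : d ≠ c := cLT_ne (hos1c d hd)
      simp [List.count_eq_zero, this]
    have hflat2 : os2.flatMap (fun d => blk d ((s ++ [c]).count d))
        = os2.flatMap (fun d => blk d (s.count d)) := by
      apply flat_congr
      intro d hd
      have : d ≠ c := fun e => cLT_ne (hcos2 d hd) e.symm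
      simp [List.count_eq_zero, this]
    rw [hflat1, hflat2, hn]
    have : blk c 1 = [(c, (0 : Int))] := rfl
    simp [this]

theorem blk_explicit (c : Char) (m : Nat) :
    blk c (m + 1) = (c, (0 : Int)) :: (List.range m).map (fun i => (c, ((i + 1 : Nat) : Int))) := by
  unfold blk
  rw [List.range_succ_eq_map, List.map_cons, List.map_map]
  refine congrArg₂ _ rfl (List.map_congr_left ?_)
  intro i _
  simp [Nat.succ_eq_add_one]

theorem skipFold (E : List (Int × (Char × Int))) (d : PySem.Dict Char Int)
    (h : ∀ p ∈ E, ¬ p.2.2 = 0) :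
    E.foldl (fun (d : PySem.Dict Char Int) q => if q.2.2 = 0 then d.insert q.2.1 q.1 else d) d = d := by
  induction E generalizing d with
  | nil => rfl
  | cons p t ih =>
    rw [List.foldl_cons, if_neg (h p (by simp))]
    exact ih d (fun q hq => h q (by simp [hq]))

theorem blkFold (c : Char) (n : Nat) (hn : 0 < n) (i0 : Int) (d : PySem.Dict Char Int) :
    (PySem.List.enumerate (blk c n) i0).foldl
      (fun (d : PySem.Dict Char Int) q => if q.2.2 = 0 then d.insert q.2.1 q.1 else d) d
      = d.insert c i0 := by
  obtain ⟨m, rfl⟩ := Nat.exists_eq_add_of_lt hn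
  rw [show 0 + m + 1 = m + 1 by omega, blk_explicit, PySem.List.enumerate_cons, List.foldl_cons]
  rw [if_pos rfl]
  apply skipFold
  intro p hp
  rcases (PySem.List.mem_enumerate_iff _ _ _).1 hp with ⟨k, hk, rfl⟩
  have : ((List.range m).map (fun i => (c, ((i + 1 : Nat) : Int))))[k] ∈ _ := List.getElem_mem hk
  rcases List.mem_map.1 this with ⟨i, _, he⟩
  simp only [← he]
  intro hcontra
  omega
theorem foldA_gen (os : List Char) (m : Char → Nat) :
    ∀ (d : PySem.Dict Char Int) (i0 : Int),
    os.Nodup → (∀ c ∈ os, 0 < m c ∧ d.contains c = false) →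
    ((PySem.List.enumerate (os.flatMap (fun c => blk c (m c))) i0).foldl
      (fun (d : PySem.Dict Char Int) q => if q.2.2 = 0 then d.insert q.2.1 q.1 else d) d).items
      = d.items ++ scanL (fun c => ((m c : Nat) : Int)) os i0 := by
  induction os with
  | nil => intro d i0 _ _; simp [scanL]
  | cons c t ih =>
    intro d i0 hnd hcond
    rw [List.flatMap_cons, PySem.List.enumerate_append, List.foldl_append]
    rw [blkFold c (m c) (hcond c (by simp)).1 i0 d]
    have hlen : (blk c (m c)).length = m c := by simp [blk]
    rw [hlen]
    rw [ih (d.insert c i0) (i0 + (m c : Int)) hnd.of_cons (fun c' hc' => by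
      refine ⟨(hcond c' (by simp [hc'])).1, ?_⟩
      rw [PySem.Dict.contains_insert]
      have hne : c' ≠ c := fun e => (List.nodup_cons.1 hnd).1 (e ▸ hc')
      simp [hne, (hcond c' (by simp [hc'])).2])]
    rw [PySem.Dict.items_insert_of_not_contains d i0 (hcond c (by simp)).2]
    simp [scanL]

theorem foldB_gen (os : List Char) (f : Char → Int) :
    ∀ (d : PySem.Dict Char Int) (i0 : Int),
    os.Nodup → (∀ c ∈ os, d.contains c = false) →
    ((os.foldl (fun (st : PySem.Dict Char Int × Int) ch => (st.1.insert ch st.2, st.2 + f ch))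
      (d, i0)).1).items = d.items ++ scanL f os i0 := by
  induction os with
  | nil => intro d i0 _ _; simp [scanL]
  | cons c t ih =>
    intro d i0 hnd hcond
    rw [List.foldl_cons]
    rw [ih (d.insert c i0) (i0 + f c) hnd.of_cons (fun c' hc' => by
      rw [PySem.Dict.contains_insert]
      have hne : c' ≠ c := fun e => (List.nodup_cons.1 hnd).1 (e ▸ hc')
      simp [hne, hcond c' (by simp [hc'])])]
    rw [PySem.Dict.items_insert_of_not_contains d i0 (hcond c (by simp))]
    simp [scanL]

theorem cfoIndexed_fst (s : List Char) :
    (cfoIndexed s).1 = s.foldl (fun (d : PySem.Dict Char Int) x => d.modify x 0 (· + 1)) PySem.Dict.empty := by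
  unfold cfoIndexed
  suffices h : ∀ (st : PySem.Dict Char Int × List (Char × Int)),
      (s.foldl (fun st ch => (st.1.modify ch 0 (· + 1), st.2 ++ [(ch, st.1.getD ch 0)])) st).1
        = s.foldl (fun d x => d.modify x 0 (· + 1)) st.1 by
    exact h _
  induction s with
  | nil => intro st; rfl
  | cons a t ih => intro st; exact ih _

theorem cfoIndexed_append (s : List Char) (c : Char) :
    (cfoIndexed (s ++ [c])).2 = (cfoIndexed s).2 ++ [(c, (s.count c : Int))] := by
  have hstep : cfoIndexed (s ++ [c])
      = ((cfoIndexed s).1.modify c 0 (· + 1), (cfoIndexed s).2 ++ [(c, (cfoIndexed s).1.getD c 0)]) := by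
    unfold cfoIndexed
    rw [List.foldl_append, List.foldl_cons, List.foldl_nil]
  rw [hstep]
  rw [cfoIndexed_fst, PySem.Dict.getD_foldl_modify_add_one]
  simp

theorem sortA_canon (s : List Char) : cfoSort (cfoIndexed s).2 = canon s := by
  induction s using List.reverseRecOn with
  | nil => rfl
  | append_singleton s c ih =>
    rw [cfoIndexed_append]
    unfold cfoSort
    rw [List.foldl_append, List.foldl_cons, List.foldl_nil]
    show PySem.List.insertBy _ (c, (s.count c : Int)) (cfoSort (cfoIndexed s).2) = _
    rw [ih, insert_canon]

theorem foldA_scan (s : List Char) :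
    (cfoDict (canon s)).items = scanL (fun c => (s.count c : Int)) (keyOrder s) 0 := by
  unfold cfoDict canon
  rw [foldA_gen (keyOrder s) (fun c => s.count c) PySem.Dict.empty 0 (keyOrder_nodup s)
    (fun c hc => ⟨List.count_pos_iff.2 (keyOrder_subset s c hc), PySem.Dict.contains_empty c⟩)]
  simp [show (PySem.Dict.empty : PySem.Dict Char Int).items = [] from rfl]

theorem order_eq (s : List Char) : cfoOrder (PySem.Dict.counter s) = keyOrder s := by
  unfold cfoOrder keyOrder
  rw [PySem.Dict.contains_counter, PySem.Dict.keys_counter]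

theorem foldB_scan (s : List Char) :
    ((cfoAccum (PySem.Dict.counter s) (keyOrder s)).1).items
      = scanL (fun c => (s.count c : Int)) (keyOrder s) 0 := by
  unfold cfoAccum
  rw [foldB_gen (keyOrder s) _ PySem.Dict.empty 0 (keyOrder_nodup s)
    (fun c _ => PySem.Dict.contains_empty c)]
  simp only [PySem.Dict.getD_counter]
  simp [show (PySem.Dict.empty : PySem.Dict Char Int).items = [] from rfl]

-- ===== VERDICT (by name: the statement is the Claim_ definition above) =====
theorem create_first_occurrence_spec : Claim_equal_create_first_occurrence := by
  intro last_col _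
  unfold Spec_create_first_occurrence create_first_occurrence create_first_occurrence_alt
  rw [sortA_canon, foldA_scan]
  simp only [order_eq, foldB_scan]
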